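-- pv_equiv track=rewrite | github.com/CampusReachEight/CampusReach_team_08 | .github/scripts/manage_test_state.py | get_gradle_args
-- ===== SOURCE A (Python) =====
-- def get_gradle_args(state, target_suite):
--     # Filter memory for tests belonging to this suite
--     suite_tests = {k: v for k, v in state["tests"].items() if v.get("suite") == target_suite}
--
--     # If we have NO record of tests for this suite, it means we've never run them.
--     # So we must RUN_ALL.
--     if not suite_tests:
--         return "RUN_ALL"
--
--     # Find failed tests for this specific suite
--     failed_tests = [tid for tid, data in suite_tests.items() if data.get("status") == "failed"]
--
--     # If we have history, but no failures, we can skip.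
--     if not failed_tests:
--         return "NONE"
--
--     if target_suite == "android":
--         # Android Format: com.package.Class#method
--         return ",".join(failed_tests)
--     else:
--         # Unit Test Format: --tests "com.package.Class.method"
--         # Convert '#' to '.' because testDebugUnitTest uses dots for methods
--         return " ".join([f'--tests "{t.replace("#", ".")}"' for t in failed_tests])
-- ===== SOURCE B (Python) =====
-- def get_gradle_args(state, target_suite):
--     # Streaming rewrite: no intermediate dict/list and no join().  The piece
--     # formatter and separator are fixed up front from target_suite, and the
--     # answer string is accumulated directly while scanning the test memory
--     # once; a seen-flag and a piece counter keep the RUN_ALL/NONE distinction.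
--     android = target_suite == "android"
--     sep = "," if android else " "
--     saw = False
--     n = 0
--     out = ""
--     for tid, data in state["tests"].items():
--         if data.get("suite") != target_suite:
--             continue
--         saw = True
--         if data.get("status") != "failed":
--             continue
--         if n:
--             out += sep
--         out += tid if android else '--tests "{}"'.format(tid.replace("#", "."))
--         n += 1
--     if not saw:
--         return "RUN_ALL"
--     if not n:
--         return "NONE"
--     return out
-- ===== Notes on version B (the rewrite author's own statement) =====
-- stated objective: alternative
-- what changed: B replaces A's staged pipeline (dict comprehension, list comprehension, map+join) by a streaming scan that accumulates the final gradle argument string directly, with separator and per-test formatting fixed before the loop and no intermediate dict/list or join().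
import Mathlib
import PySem

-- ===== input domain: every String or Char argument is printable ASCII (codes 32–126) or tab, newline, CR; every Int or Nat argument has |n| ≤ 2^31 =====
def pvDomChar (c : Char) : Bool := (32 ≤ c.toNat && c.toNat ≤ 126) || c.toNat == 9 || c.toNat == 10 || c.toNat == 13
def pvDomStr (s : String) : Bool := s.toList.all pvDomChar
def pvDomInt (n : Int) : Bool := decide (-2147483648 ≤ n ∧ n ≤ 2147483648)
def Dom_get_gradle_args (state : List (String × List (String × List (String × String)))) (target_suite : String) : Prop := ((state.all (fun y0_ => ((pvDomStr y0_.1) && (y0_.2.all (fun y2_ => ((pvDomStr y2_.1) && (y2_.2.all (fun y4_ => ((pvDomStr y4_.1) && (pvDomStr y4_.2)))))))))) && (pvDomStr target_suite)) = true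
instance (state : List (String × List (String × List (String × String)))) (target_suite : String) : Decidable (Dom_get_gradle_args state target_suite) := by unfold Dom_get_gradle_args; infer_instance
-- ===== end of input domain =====

-- B replaces A's staged pipeline (filter dict, filter list, map+join) by a streaming
-- scan that accumulates the final argument string directly; same return value.

-- ===== PORT A =====
def get_gradle_args (state : List (String × List (String × List (String × String)))) (target_suite : String) : String :=
  match (PySem.Dict.ofList state).get? "tests" with
  | none => ""  -- state["tests"] raises KeyError here; excluded by Pre_
  | some tests =>
    let suite_tests := (PySem.Dict.ofList tests).items.filter
      (fun kv => (PySem.Dict.ofList kv.2).get? "suite" == some target_suite)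
    if suite_tests.isEmpty then "RUN_ALL"
    else
      let failed_tests := (suite_tests.filter
        (fun kv => (PySem.Dict.ofList kv.2).get? "status" == some "failed")).map (·.1)
      if failed_tests.isEmpty then "NONE"
      else if target_suite == "android" then
        PySem.Str.join "," failed_tests
      else
        PySem.Str.join " " (failed_tests.map (fun t => "--tests \"" ++ PySem.Str.replace t "#" "." ++ "\""))

-- ===== PORT B =====
def get_gradle_args_alt (state : List (String × List (String × List (String × String)))) (target_suite : String) : String :=
  match (PySem.Dict.ofList state).get? "tests" with
  | none => ""  -- state["tests"] raises KeyError here; excluded by Pre_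
  | some tests =>
    let android := target_suite == "android"
    let sep := if android then "," else " "
    let r := (PySem.Dict.ofList tests).items.foldl
      (fun (a : Bool × Nat × String) kv =>
        if (PySem.Dict.ofList kv.2).get? "suite" != some target_suite then a
        else if (PySem.Dict.ofList kv.2).get? "status" != some "failed" then (true, a.2.1, a.2.2)
        else (true, a.2.1 + 1,
          (if a.2.1 ≠ 0 then a.2.2 ++ sep else a.2.2) ++
            (if android then kv.1 else "--tests \"" ++ PySem.Str.replace kv.1 "#" "." ++ "\"")))
      (false, 0, "")
    if !r.1 then "RUN_ALL"
    else if r.2.1 == 0 then "NONE"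
    else r.2.2

-- ===== PRECONDITION & SPEC =====
-- A raises KeyError exactly when "tests" is not a key of state; Pre_ excludes those inputs.
def Pre_get_gradle_args (state : List (String × List (String × List (String × String)))) (target_suite : String) : Prop :=
  ((PySem.Dict.ofList state).get? "tests").isSome = true
instance (state : List (String × List (String × List (String × String)))) (target_suite : String) : Decidable (Pre_get_gradle_args state target_suite) := by unfold Pre_get_gradle_args; infer_instance

def pvWitness_get_gradle_args : (List (String × List (String × List (String × String)))) × String :=
  ([("tests", [("t1", [("suite", "unit"), ("status", "failed")])])], "unit")

def Spec_get_gradle_args (state : List (String × List (String × List (String × String)))) (target_suite : String) (out : String) : Prop := out = get_gradle_args_alt state target_suite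
instance (state : List (String × List (String × List (String × String)))) (target_suite : String) (out : String) : Decidable (Spec_get_gradle_args state target_suite out) := by unfold Spec_get_gradle_args; infer_instance

-- ===== CLAIM (what is proved, stated in full; the proofs are below) =====
def Claim_equal_get_gradle_args : Prop := ∀ (state : List (String × List (String × List (String × String)))) (target_suite : String), Dom_get_gradle_args state target_suite → Pre_get_gradle_args state target_suite → Spec_get_gradle_args state target_suite (get_gradle_args state target_suite)

-- ===== LEMMAS AND PROOFS =====

theorem intercalate_append_singleton (sep x : List Char) (L : List (List Char)) :
    sep.intercalate (L ++ [x]) =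
      (if L.length ≠ 0 then sep.intercalate L ++ sep else sep.intercalate L) ++ x := by
  induction L with
  | nil => simp [List.intercalate]
  | cons p tl ih =>
    cases tl with
    | nil => simp [List.intercalate, List.intersperse]
    | cons q tl' =>
      have h1 : sep.intercalate (p :: q :: tl' ++ [x]) =
          p ++ sep ++ sep.intercalate (q :: tl' ++ [x]) := by
        simp [List.intercalate, List.intersperse]
      have h2 : sep.intercalate (p :: q :: tl') = p ++ sep ++ sep.intercalate (q :: tl') := by
        simp [List.intercalate, List.intersperse]
      simp only [List.cons_append] at *
      rw [h1, ih, h2]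
      simp

-- joining one more piece appends a separator exactly when pieces already exist
theorem join_append_singleton (sep x : String) (P : List String) :
    PySem.Str.join sep (P ++ [x]) =
      (if P.length ≠ 0 then PySem.Str.join sep P ++ sep else PySem.Str.join sep P) ++ x := by
  simp only [PySem.Str.join, PySem.Chars.join, List.map_append, List.map_cons, List.map_nil,
    intercalate_append_singleton, List.length_map]
  split <;> simp [String.append_assoc]

-- B's streaming loop computes (seen-flag, #pieces, the joined pieces) for generic
-- skip/not-failed predicates and piece formatter.
theorem loopB (pS pF : (String × List (String × String)) → Bool)
    (fmt : (String × List (String × String)) → String) (sep : String)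
    (l : List (String × List (String × String))) (saw : Bool) (P : List String) :
    l.foldl
      (fun (a : Bool × Nat × String) kv =>
        if pS kv then a
        else if pF kv then (true, a.2.1, a.2.2)
        else (true, a.2.1 + 1, (if a.2.1 ≠ 0 then a.2.2 ++ sep else a.2.2) ++ fmt kv))
      (saw, P.length, PySem.Str.join sep P)
    = (saw || l.any (fun kv => !pS kv),
       (P ++ ((l.filter (fun kv => !pS kv)).filter (fun kv => !pF kv)).map fmt).length,
       PySem.Str.join sep (P ++ ((l.filter (fun kv => !pS kv)).filter (fun kv => !pF kv)).map fmt)) := by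
  induction l generalizing saw P with
  | nil => simp
  | cons kv tl ih =>
    simp only [List.foldl_cons, List.any_cons, List.filter_cons]
    by_cases hs : pS kv = true
    · rw [if_pos hs, ih]
      simp [hs]
    · have hs' : pS kv = false := by revert hs; cases pS kv <;> simp
      rw [if_neg (by simp [hs'])]
      by_cases hf : pF kv = true
      · rw [if_pos hf, ih]
        simp [hs', hf]
      · have hf' : pF kv = false := by revert hf; cases pF kv <;> simp
        rw [if_neg (by simp [hf'])]
        have h1 : ((true : Bool), P.length + 1,
            (if P.length ≠ 0 then PySem.Str.join sep P ++ sep else PySem.Str.join sep P) ++ fmt kv)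
          = ((true : Bool), (P ++ [fmt kv]).length, PySem.Str.join sep (P ++ [fmt kv])) := by
          rw [join_append_singleton]; simp
        rw [h1, ih]
        simp [hs', hf']

theorem filter_isEmpty_iff_not_any {α : Type} (l : List α) (p : α → Bool) :
    (l.filter p).isEmpty = !(l.any p) := by
  induction l with
  | nil => rfl
  | cons x tl ih =>
    by_cases h : p x = true
    · simp [h]
    · simp [h, ih]

-- ===== VERDICT (by name: the statement is the Claim_ definition above) =====
theorem get_gradle_args_spec : Claim_equal_get_gradle_args := by
  intro state target_suite _ _
  unfold Spec_get_gradle_args get_gradle_args get_gradle_args_alt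
  cases h : (PySem.Dict.ofList state).get? "tests" with
  | none => rfl
  | some tests =>
    dsimp only
    have hloop := loopB (fun kv => (PySem.Dict.ofList kv.2).get? "suite" != some target_suite)
         (fun kv => (PySem.Dict.ofList kv.2).get? "status" != some "failed")
         (fun kv => if (target_suite == "android") then kv.1
                    else "--tests \"" ++ PySem.Str.replace kv.1 "#" "." ++ "\"")
         (if target_suite == "android" then "," else " ")
         (PySem.Dict.ofList tests).items false []
    rw [show PySem.Str.join (if target_suite == "android" then "," else " ") ([] : List String) = "" from by
          simp [PySem.Str.join, PySem.Chars.join, List.intercalate]] at hloop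
    simp only [List.length_nil, List.nil_append, Bool.false_or] at hloop
    have hfS : (fun (kv : String × List (String × String)) =>
        !((PySem.Dict.ofList kv.2).get? "suite" != some target_suite))
        = (fun kv => (PySem.Dict.ofList kv.2).get? "suite" == some target_suite) := by
      funext kv; simp [bne]
    have hfF : (fun (kv : String × List (String × String)) =>
        !((PySem.Dict.ofList kv.2).get? "status" != some "failed"))
        = (fun kv => (PySem.Dict.ofList kv.2).get? "status" == some "failed") := by
      funext kv; simp [bne]
    rw [hfS, hfF] at hloop
    rw [hloop]
    simp only [filter_isEmpty_iff_not_any]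
    set l := (PySem.Dict.ofList tests).items with hl
    by_cases hany : l.any (fun kv => (PySem.Dict.ofList kv.2).get? "suite" == some target_suite) = true
    · simp only [hany, Bool.not_true, Bool.false_eq_true, if_false]
      set F := (l.filter (fun kv => (PySem.Dict.ofList kv.2).get? "suite" == some target_suite)).filter
          (fun kv => (PySem.Dict.ofList kv.2).get? "status" == some "failed") with hF
      by_cases hemp : F.isEmpty = true
      · have : F = [] := by simpa [List.isEmpty_iff] using hemp
        simp [this]
      · have hne : F ≠ [] := by simpa [List.isEmpty_iff] using hemp
        by_cases ha : (target_suite == "android") = true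
        · simp [ha, List.isEmpty_iff, hne, List.length_eq_zero_iff]
        · have ha' : (target_suite == "android") = false := by
            revert ha; cases target_suite == "android" <;> simp
          simp [ha', List.isEmpty_iff, hne, List.length_eq_zero_iff, List.map_map,
            Function.comp_def]
    · have hany' : l.any (fun kv => (PySem.Dict.ofList kv.2).get? "suite" == some target_suite) = false := by
        revert hany; cases l.any (fun kv => (PySem.Dict.ofList kv.2).get? "suite" == some target_suite) <;> simp
      simp [hany']
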